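-- pv_equiv track=rewrite | github.com/fr0gb1t/git-assistant | src/git_assistant/changelog/writer.py | parse_unreleased_sections
-- ===== SOURCE A (Python) =====
-- def parse_unreleased_sections(unreleased_block: str) -> tuple[list[str], dict[str, list[str]]]:
--     """
--     Parse the [Unreleased] block into an ordered section map.
--
--     Returns:
--         section_order: list of section names in their original order
--         sections: dict of section name -> bullet entries
--     """
--     lines = unreleased_block.splitlines()
--
--     section_order: list[str] = []
--     sections: dict[str, list[str]] = {}
--     current_section: str | None = None
--
--     for line in lines[1:]:  # skip "## [Unreleased]"
--         stripped = line.strip()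
--
--         if not stripped:
--             continue
--
--         if stripped.startswith("### "):
--             current_section = stripped[4:].strip()
--             if current_section not in sections:
--                 sections[current_section] = []
--                 section_order.append(current_section)
--             continue
--
--         if stripped.startswith("- ") and current_section is not None:
--             sections[current_section].append(stripped[2:].strip())
--
--     return section_order, sections
-- ===== SOURCE B (Python) =====
-- def _is_header(line):
--     return line.strip().startswith("### ")
--
--
-- def parse_unreleased_sections(unreleased_block):
--     lines = unreleased_block.splitlines()[1:]  # skip "## [Unreleased]"
--
--     # Pass 1: cut lines into ordered segments, one per "### " header line
--     # (lines before the first header are discarded).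
--     segments = []
--     i = 0
--     n = len(lines)
--     while i < n:
--         if _is_header(lines[i]):
--             name = lines[i].strip()[4:].strip()
--             j = i + 1
--             while j < n and not _is_header(lines[j]):
--                 j += 1
--             segments.append((name, lines[i + 1:j]))
--             i = j
--         else:
--             i += 1
--
--     # Pass 2: register names (merging duplicates) and collect bullet entries.
--     section_order = []
--     sections = {}
--     for name, body in segments:
--         if name not in sections:
--             sections[name] = []
--             section_order.append(name)
--         bucket = sections[name]
--         for ln in body:
--             s = ln.strip()
--             if s.startswith("- "):
--                 bucket.append(s[2:].strip())
--     return section_order, sections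
-- ===== Notes on version B (the rewrite author's own statement) =====
-- stated objective: alternative
-- what changed: Replaces A's single loop that threads a current_section flag with a two-pass decomposition: pass 1 cuts the lines into ordered (header name, body) segments, pass 2 registers each name (merging duplicates) and collects its body's bullet entries.
import Mathlib
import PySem

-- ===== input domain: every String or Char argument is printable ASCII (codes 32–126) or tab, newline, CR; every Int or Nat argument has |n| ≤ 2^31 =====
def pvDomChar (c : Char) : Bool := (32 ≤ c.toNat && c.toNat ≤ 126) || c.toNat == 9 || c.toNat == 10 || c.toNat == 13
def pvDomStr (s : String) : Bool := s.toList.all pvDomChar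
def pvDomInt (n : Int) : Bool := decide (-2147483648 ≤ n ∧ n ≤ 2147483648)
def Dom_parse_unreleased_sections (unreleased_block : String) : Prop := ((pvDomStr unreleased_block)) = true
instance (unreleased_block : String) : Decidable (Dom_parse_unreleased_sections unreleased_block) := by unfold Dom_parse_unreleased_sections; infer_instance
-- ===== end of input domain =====

-- B replaces A's single loop threading a current_section flag by two passes:
-- segment the lines at "### " headers, then collect names and bullets per segment
-- (objective: alternative decomposition, same cost).

-- ===== PORT A =====
-- one loop step of A: state = ((section_order, sections), current_section)
def pvStepA (st : (List String × PySem.Dict String (List String)) × Option String)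
    (line : String) : (List String × PySem.Dict String (List String)) × Option String :=
  if PySem.Str.strip line = "" then st
  else if PySem.Str.startswith (PySem.Str.strip line) "### " then
    if st.1.2.contains (PySem.Str.strip (PySem.Str.slice (PySem.Str.strip line) (some 4) none)) then
      ((st.1.1, st.1.2), some (PySem.Str.strip (PySem.Str.slice (PySem.Str.strip line) (some 4) none)))
    else
      ((st.1.1 ++ [PySem.Str.strip (PySem.Str.slice (PySem.Str.strip line) (some 4) none)],
        st.1.2.insert (PySem.Str.strip (PySem.Str.slice (PySem.Str.strip line) (some 4) none)) []),
       some (PySem.Str.strip (PySem.Str.slice (PySem.Str.strip line) (some 4) none)))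
  else if PySem.Str.startswith (PySem.Str.strip line) "- " then
    match st.2 with
    | some cur =>
        -- sections[current_section].append(...): the key is always present here,
        -- so Dict.modify with default [] is exact
        ((st.1.1, st.1.2.modify cur [] (· ++ [PySem.Str.strip (PySem.Str.slice (PySem.Str.strip line) (some 2) none)])), st.2)
    | none => st
  else st

def parse_unreleased_sections (unreleased_block : String) :
    List String × (List (String × List String)) :=
  let st := (PySem.List.slice (PySem.Str.splitlines unreleased_block) (some 1) none).foldl
      pvStepA (([], PySem.Dict.empty), none)
  (st.1.1, st.1.2.items)

-- ===== PORT B =====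
def pvIsHeader (line : String) : Bool :=
  PySem.Str.startswith (PySem.Str.strip line) "### "

def pvHeaderName (line : String) : String :=
  PySem.Str.strip (PySem.Str.slice (PySem.Str.strip line) (some 4) none)

-- the inner while loop of pass 1: body lines up to the next header, and the rest
def pvTakeBody : List String → List String × List String
  | [] => ([], [])
  | l :: ls =>
    if pvIsHeader l then ([], l :: ls)
    else
      let p := pvTakeBody ls
      (l :: p.1, p.2)

theorem pvTakeBody_len : ∀ ls : List String, (pvTakeBody ls).2.length ≤ ls.length := by
  intro ls
  induction ls with
  | nil => simp [pvTakeBody]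
  | cons l ls ih =>
    simp only [pvTakeBody]
    split
    · simp
    · simpa using Nat.le_succ_of_le ih

-- pass 1: the ordered list of (header name, body lines) segments
def pvSegs : List String → List (String × List String)
  | [] => []
  | l :: ls =>
    if pvIsHeader l then
      (pvHeaderName l, (pvTakeBody ls).1) :: pvSegs (pvTakeBody ls).2
    else pvSegs ls
termination_by ls => ls.length
decreasing_by
  · exact Nat.lt_succ_of_le (pvTakeBody_len ls)
  · exact Nat.lt_succ_self _

-- the bullet entries of a segment body
def pvBullets : List String → List String
  | [] => []
  | l :: ls =>
    if PySem.Str.startswith (PySem.Str.strip l) "- " then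
      PySem.Str.strip (PySem.Str.slice (PySem.Str.strip l) (some 2) none) :: pvBullets ls
    else pvBullets ls

-- pass 2, one segment: register the name, append its bullets
def pvStepB (st : List String × PySem.Dict String (List String))
    (seg : String × List String) : List String × PySem.Dict String (List String) :=
  let st' := if st.2.contains seg.1 then st else (st.1 ++ [seg.1], st.2.insert seg.1 [])
  (st'.1, (pvBullets seg.2).foldl (fun d x => d.modify seg.1 [] (· ++ [x])) st'.2)

def parse_unreleased_sections_alt (unreleased_block : String) :
    List String × (List (String × List String)) :=
  let st := (pvSegs (PySem.List.slice (PySem.Str.splitlines unreleased_block) (some 1) none)).foldl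
      pvStepB ([], PySem.Dict.empty)
  (st.1, st.2.items)

-- ===== PRECONDITION & SPEC =====
def Spec_parse_unreleased_sections (unreleased_block : String) (out : List String × (List (String × List String))) : Prop := out = parse_unreleased_sections_alt unreleased_block
instance (unreleased_block : String) (out : List String × (List (String × List String))) : Decidable (Spec_parse_unreleased_sections unreleased_block out) := by unfold Spec_parse_unreleased_sections; infer_instance

-- ===== CLAIM (what is proved, stated in full; the proofs are below) =====
def Claim_equal_parse_unreleased_sections : Prop := ∀ (unreleased_block : String), Dom_parse_unreleased_sections unreleased_block → Spec_parse_unreleased_sections unreleased_block (parse_unreleased_sections unreleased_block)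

-- ===== LEMMAS AND PROOFS =====

theorem pvTakeBody_spec : ∀ ls : List String,
    (pvTakeBody ls).1 ++ (pvTakeBody ls).2 = ls ∧
    (∀ l ∈ (pvTakeBody ls).1, pvIsHeader l = false) ∧
    ((pvTakeBody ls).2 = [] ∨ ∃ l t, (pvTakeBody ls).2 = l :: t ∧ pvIsHeader l = true) := by
  intro ls
  induction ls with
  | nil => simp [pvTakeBody]
  | cons l ls ih =>
    simp only [pvTakeBody]
    by_cases h : pvIsHeader l
    · simp [h]
    · simp only [h, if_neg, Bool.false_eq_true, not_false_eq_true]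
      refine ⟨by simp [ih.1], ?_, ih.2.2⟩
      intro x hx
      rcases List.mem_cons.mp hx with rfl | hx
      · simpa using h
      · exact ih.2.1 x hx

-- A's loop over a header-free body with current_section = some c appends exactly the bullets
theorem pvFoldBody (b : List String) (hb : ∀ l ∈ b, pvIsHeader l = false) :
    ∀ (o : List String) (d : PySem.Dict String (List String)) (c : String),
    b.foldl pvStepA ((o, d), some c) =
      ((o, (pvBullets b).foldl (fun d x => d.modify c [] (· ++ [x])) d), some c) := by
  induction b with
  | nil => intro o d c; simp [pvBullets]
  | cons l b ih =>
    intro o d c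
    have hl : pvIsHeader l = false := hb l (List.mem_cons_self ..)
    have hlh : ¬ PySem.Str.startswith (PySem.Str.strip l) "### " = true := by
      unfold pvIsHeader at hl; rw [hl]; decide
    have hb' : ∀ x ∈ b, pvIsHeader x = false := fun x hx => hb x (List.mem_cons_of_mem _ hx)
    simp only [List.foldl_cons, pvBullets]
    by_cases he : PySem.Str.strip l = ""
    · have hnb : ¬ PySem.Str.startswith (PySem.Str.strip l) "- " = true := by
        rw [he]; decide
      have hstep : pvStepA ((o, d), some c) l = ((o, d), some c) := by
        unfold pvStepA; rw [if_pos he]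
      rw [hstep, if_neg hnb]
      exact ih hb' o d c
    · by_cases hd : PySem.Str.startswith (PySem.Str.strip l) "- " = true
      · have hstep : pvStepA ((o, d), some c) l =
            ((o, d.modify c [] (· ++ [PySem.Str.strip (PySem.Str.slice (PySem.Str.strip l) (some 2) none)])), some c) := by
          unfold pvStepA; rw [if_neg he, if_neg hlh, if_pos hd]
        rw [hstep, if_pos hd, List.foldl_cons]
        exact ih hb' o _ c
      · have hstep : pvStepA ((o, d), some c) l = ((o, d), some c) := by
          unfold pvStepA; rw [if_neg he, if_neg hlh, if_neg hd]
        rw [hstep, if_neg hd]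
        exact ih hb' o d c

-- A's whole loop equals B's fold over the segments, provided the loop is at a
-- point where current_section is None or the next line is a header
theorem pvFoldMain : ∀ (n : Nat) (ls : List String), ls.length ≤ n →
    ∀ (o : List String) (d : PySem.Dict String (List String)) (cur : Option String),
    (cur = none ∨ ls = [] ∨ ∃ l t, ls = l :: t ∧ pvIsHeader l = true) →
    (ls.foldl pvStepA ((o, d), cur)).1 = (pvSegs ls).foldl pvStepB (o, d) := by
  intro n
  induction n with
  | zero =>
    intro ls hlen o d cur _
    have : ls = [] := List.eq_nil_of_length_eq_zero (Nat.le_zero.mp hlen)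
    subst this; simp [pvSegs]
  | succ n ih =>
    intro ls hlen o d cur hP
    cases ls with
    | nil => simp [pvSegs]
    | cons l t =>
      by_cases hl : pvIsHeader l
      · -- header line: one segment, then recurse on the rest
        obtain ⟨hsplit, hbody, hrest⟩ := pvTakeBody_spec t
        have hne : ¬ PySem.Str.strip l = "" := by
          intro h
          unfold pvIsHeader at hl; rw [h] at hl
          exact absurd hl (by decide)
        have hlh : PySem.Str.startswith (PySem.Str.strip l) "### " = true := by
          unfold pvIsHeader at hl; exact hl
        have hstep : pvStepA ((o, d), cur) l =
            ((if d.contains (pvHeaderName l) then (o, d)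
              else (o ++ [pvHeaderName l], d.insert (pvHeaderName l) [])), some (pvHeaderName l)) := by
          unfold pvStepA pvHeaderName
          rw [if_neg hne, if_pos hlh]
          by_cases hc : d.contains (PySem.Str.strip (PySem.Str.slice (PySem.Str.strip l) (some 4) none)) = true <;>
            simp [hc]
        have hsegs : pvSegs (l :: t) = (pvHeaderName l, (pvTakeBody t).1) :: pvSegs (pvTakeBody t).2 := by
          rw [pvSegs]; rw [if_pos hl]
        have hrlen : (pvTakeBody t).2.length ≤ n := by
          have h1 := pvTakeBody_len t
          simp only [List.length_cons] at hlen
          omega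
        rcases hPd : (if d.contains (pvHeaderName l) then (o, d)
            else (o ++ [pvHeaderName l], d.insert (pvHeaderName l) [])) with ⟨o', d'⟩
        have hstepB : pvStepB (o, d) (pvHeaderName l, (pvTakeBody t).1) =
            (o', (pvBullets (pvTakeBody t).1).foldl
              (fun d x => d.modify (pvHeaderName l) [] (· ++ [x])) d') := by
          simp only [pvStepB]
          rw [hPd]
        rw [hsegs, List.foldl_cons, hstep, hPd, List.foldl_cons, hstepB]
        conv_lhs => rw [← hsplit]
        rw [List.foldl_append, pvFoldBody (pvTakeBody t).1 hbody o' d' (pvHeaderName l)]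
        exact ih (pvTakeBody t).2 hrlen o' _ (some (pvHeaderName l)) (Or.inr hrest)
      · -- non-header line: A skips it (current is None here), B's pass 1 skips it
        have hcur : cur = none := by
          rcases hP with h | h | ⟨x, t', hx, hxh⟩
          · exact h
          · simp at h
          · cases hx; rw [hxh] at hl; exact absurd rfl hl
        subst hcur
        have hlh : ¬ PySem.Str.startswith (PySem.Str.strip l) "### " = true := by
          unfold pvIsHeader at hl; exact hl
        have hstep : pvStepA ((o, d), none) l = ((o, d), none) := by
          unfold pvStepA
          by_cases he : PySem.Str.strip l = ""
          · rw [if_pos he]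
          · rw [if_neg he, if_neg hlh]
            split <;> rfl
        have hsegs : pvSegs (l :: t) = pvSegs t := by
          rw [pvSegs]; rw [if_neg (by simp [hl])]
        rw [List.foldl_cons, hstep, hsegs]
        exact ih t (by simpa using Nat.le_of_succ_le_succ hlen) o d none (Or.inl rfl)

-- ===== VERDICT (by name: the statement is the Claim_ definition above) =====
theorem parse_unreleased_sections_spec : Claim_equal_parse_unreleased_sections := by
  intro u _
  unfold Spec_parse_unreleased_sections parse_unreleased_sections parse_unreleased_sections_alt
  have h := pvFoldMain (PySem.List.slice (PySem.Str.splitlines u) (some 1) none).length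
      (PySem.List.slice (PySem.Str.splitlines u) (some 1) none) le_rfl
      [] PySem.Dict.empty none (Or.inl rfl)
  show (((PySem.List.slice (PySem.Str.splitlines u) (some 1) none).foldl pvStepA (([], PySem.Dict.empty), none)).1.1,
        ((PySem.List.slice (PySem.Str.splitlines u) (some 1) none).foldl pvStepA (([], PySem.Dict.empty), none)).1.2.items) =
       (((pvSegs (PySem.List.slice (PySem.Str.splitlines u) (some 1) none)).foldl pvStepB ([], PySem.Dict.empty)).1,
        ((pvSegs (PySem.List.slice (PySem.Str.splitlines u) (some 1) none)).foldl pvStepB ([], PySem.Dict.empty)).2.items)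
  rw [h]
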